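-- pv_equiv track=rewrite | github.com/xmdde/data-security | L1/sequence.py | sequence_from_poly
-- ===== SOURCE A (Python) =====
-- def sequence_from_poly(p: int, a_coeffs: list[int], init_state: list[int], max_iter: int = 200000):
--     m = len(a_coeffs)
--     if len(init_state) != m:
--         raise ValueError("init_state musi mieć długość m")
--     state = list(init_state)
--     seen = {tuple(state): 0}
--     idx = 0
--     while True:
--         nxt = (-sum((a_coeffs[j] * state[j]) % p for j in range(m))) % p
--         state = state[1:] + [nxt]
--         idx += 1
--         t = tuple(state)
--         if t in seen:
--             return idx - seen[t]
--         seen[t] = idx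
--         if idx > max_iter:
--             return None
-- ===== SOURCE B (Python) =====
-- def sequence_from_poly(p: int, a_coeffs: list[int], init_state: list[int], max_iter: int = 200000):
--     m = len(a_coeffs)
--     if len(init_state) != m:
--         raise ValueError("init_state musi mieć długość m")
--
--     def step(st):
--         nxt = (-sum((a_coeffs[j] * st[j]) % p for j in range(m))) % p
--         return st[1:] + [nxt]
--
--     # A returns a value exactly when the first repeated state occurs within
--     # N iterations, where N accounts for A always running at least one step.
--     N = (max_iter if max_iter > 0 else 0) + 1
--
--     # Floyd phase 1: find a meeting point x_i == x_{2i} with i <= N,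
--     # storing nothing (A stores every visited state in a dict).
--     tort = step(list(init_state))
--     hare = step(step(list(init_state)))
--     i = 1
--     while tort != hare:
--         if i >= N:
--             return None
--         tort = step(tort)
--         hare = step(step(hare))
--         i += 1
--
--     # phase 2: tail length mu
--     mu = 0
--     t1 = list(init_state)
--     t2 = tort
--     while t1 != t2:
--         t1 = step(t1)
--         t2 = step(t2)
--         mu += 1
--
--     # phase 3: cycle length lam
--     lam = 1
--     h = step(t1)
--     while h != t1:
--         h = step(h)
--         lam += 1
--
--     return lam if mu + lam <= N else None
-- ===== Notes on version B (the rewrite author's own statement) =====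
-- stated objective: alternative
-- what changed: Replaces the dict of all visited states (hash first-repeat detection) by Floyd's tortoise-and-hare cycle detection over the same step function: it finds the cycle length lam and tail length mu with O(1) extra memory and returns lam exactly when A's dict search would return (first repeat within max(max_iter,0)+1 steps), None otherwise.
import Mathlib
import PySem

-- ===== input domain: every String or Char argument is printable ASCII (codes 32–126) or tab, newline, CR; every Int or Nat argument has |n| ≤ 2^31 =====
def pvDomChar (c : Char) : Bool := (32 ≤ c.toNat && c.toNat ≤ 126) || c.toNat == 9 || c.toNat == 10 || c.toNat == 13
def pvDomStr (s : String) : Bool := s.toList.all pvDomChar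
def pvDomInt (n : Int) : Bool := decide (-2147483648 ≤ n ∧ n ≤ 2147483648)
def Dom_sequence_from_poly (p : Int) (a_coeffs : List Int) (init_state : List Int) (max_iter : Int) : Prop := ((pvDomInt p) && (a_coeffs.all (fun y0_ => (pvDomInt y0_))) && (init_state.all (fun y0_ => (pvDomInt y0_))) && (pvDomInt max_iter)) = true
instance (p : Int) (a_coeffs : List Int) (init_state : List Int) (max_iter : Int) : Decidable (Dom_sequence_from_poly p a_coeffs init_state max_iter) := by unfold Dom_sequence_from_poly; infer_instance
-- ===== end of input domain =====

-- B replaces A's dict of all visited states by Floyd's tortoise-and-hare cycle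
-- detection over the same step function (O(1) extra memory instead of a hash of
-- every state); equal return value on every input where A returns (Pre_).

-- ===== PORT A =====
-- sum((a_coeffs[j] * state[j]) % p for j in range(m)) with m = len(a_coeffs)
def pvTermSum (p : Int) (a st : List Int) : Int :=
  (List.range a.length).foldl (fun acc j => acc + PySem.Int.mod (a.getD j 0 * st.getD j 0) p) 0

-- one loop iteration's new state: state[1:] + [(-sum(...)) % p]
-- (this exact expression occurs verbatim in A's loop body and in B's step())
def pvStep (p : Int) (a : List Int) (st : List Int) : List Int :=
  st.drop 1 ++ [PySem.Int.mod (-(pvTermSum p a st)) p]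

-- A's while-loop; fuel = (max_iter - idx).toNat replaces the `idx > max_iter`
-- exit test (fuel = 0 exactly when idx + 1 > max_iter), making the loop total.
def pvLoopA (p : Int) (a : List Int) (seen : PySem.Dict (List Int) Int) (st : List Int) (idx : Int) (fuel : Nat) : Option Int :=
  match seen.get? (pvStep p a st) with
  | some j => some (idx + 1 - j)
  | none =>
    match fuel with
    | 0 => none
    | f + 1 => pvLoopA p a (seen.insert (pvStep p a st) (idx + 1)) (pvStep p a st) (idx + 1) f

def sequence_from_poly (p : Int) (a_coeffs : List Int) (init_state : List Int) (max_iter : Int) : Option Int :=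
  if init_state.length ≠ a_coeffs.length then none  -- Python: raise ValueError (outside Pre_)
  else pvLoopA p a_coeffs ((PySem.Dict.empty).insert init_state 0) init_state 0 max_iter.toNat

-- ===== PORT B =====
-- Floyd phase 1: while tort != hare, advance (tort, hare) by (1, 2) steps;
-- fuel = (N - i).toNat replaces the `i >= N: return None` cutoff test.
def pvMeet (p : Int) (a : List Int) (tort hare : List Int) (fuel : Nat) : Option (List Int) :=
  if tort = hare then some tort
  else
    match fuel with
    | 0 => none
    | f + 1 => pvMeet p a (pvStep p a tort) (pvStep p a (pvStep p a hare)) f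

-- Floyd phase 2: tail length mu (fuel guard only; proven never to run out)
def pvMu (p : Int) (a : List Int) (t1 t2 : List Int) (mu : Int) (fuel : Nat) : Option (List Int × Int) :=
  if t1 = t2 then some (t1, mu)
  else
    match fuel with
    | 0 => none
    | f + 1 => pvMu p a (pvStep p a t1) (pvStep p a t2) (mu + 1) f

-- Floyd phase 3: cycle length lam (fuel guard only; proven never to run out)
def pvLam (p : Int) (a : List Int) (t1 h : List Int) (lam : Int) (fuel : Nat) : Option Int :=
  if h = t1 then some lam
  else
    match fuel with
    | 0 => none
    | f + 1 => pvLam p a t1 (pvStep p a h) (lam + 1) f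

-- N = (max_iter if max_iter > 0 else 0) + 1 : A returns a value iff the first
-- repeated state occurs within N iterations (A always runs at least one step)
def pvN (max_iter : Int) : Int := (if max_iter > 0 then max_iter else 0) + 1

def sequence_from_poly_alt (p : Int) (a_coeffs : List Int) (init_state : List Int) (max_iter : Int) : Option Int :=
  if init_state.length ≠ a_coeffs.length then none  -- Python: raise ValueError (outside Pre_)
  else
    match pvMeet p a_coeffs (pvStep p a_coeffs init_state)
        (pvStep p a_coeffs (pvStep p a_coeffs init_state)) (pvN max_iter - 1).toNat with
    | none => none
    | some tort =>
      match pvMu p a_coeffs init_state tort 0 (pvN max_iter).toNat with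
      | none => none  -- unreachable (fuel shown sufficient)
      | some (t1, mu) =>
        match pvLam p a_coeffs t1 (pvStep p a_coeffs t1) 1 (pvN max_iter).toNat with
        | none => none  -- unreachable (fuel shown sufficient)
        | some lam => if mu + lam ≤ pvN max_iter then some lam else none

-- ===== PRECONDITION & SPEC =====
-- Pre_ excludes exactly the inputs where Python A raises: p = 0 (ZeroDivisionError
-- in the % p) and len(init_state) != len(a_coeffs) (explicit ValueError).
def Pre_sequence_from_poly (p : Int) (a_coeffs : List Int) (init_state : List Int) (max_iter : Int) : Prop :=
  p ≠ 0 ∧ init_state.length = a_coeffs.length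
instance (p : Int) (a_coeffs : List Int) (init_state : List Int) (max_iter : Int) : Decidable (Pre_sequence_from_poly p a_coeffs init_state max_iter) := by unfold Pre_sequence_from_poly; infer_instance

def pvWitness_sequence_from_poly : Int × List Int × List Int × Int := (5, [1, 1], [1, 2], 10)

def Spec_sequence_from_poly (p : Int) (a_coeffs : List Int) (init_state : List Int) (max_iter : Int) (out : Option Int) : Prop := out = sequence_from_poly_alt p a_coeffs init_state max_iter
instance (p : Int) (a_coeffs : List Int) (init_state : List Int) (max_iter : Int) (out : Option Int) : Decidable (Spec_sequence_from_poly p a_coeffs init_state max_iter out) := by unfold Spec_sequence_from_poly; infer_instance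

-- ===== CLAIM (what is proved, stated in full; the proofs are below) =====
def Claim_equal_sequence_from_poly : Prop := ∀ (p : Int) (a_coeffs : List Int) (init_state : List Int) (max_iter : Int), Dom_sequence_from_poly p a_coeffs init_state max_iter → Pre_sequence_from_poly p a_coeffs init_state max_iter → Spec_sequence_from_poly p a_coeffs init_state max_iter (sequence_from_poly p a_coeffs init_state max_iter)

-- ===== LEMMAS AND PROOFS =====

-- The orbit of the step function: x k = step^[k] init_state
def pvX (p : Int) (a s : List Int) (k : Nat) : List Int := (pvStep p a)^[k] s

theorem pvX_zero (p : Int) (a s : List Int) : pvX p a s 0 = s := rfl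

theorem pvX_succ (p : Int) (a s : List Int) (k : Nat) :
    pvX p a s (k + 1) = pvStep p a (pvX p a s k) := Function.iterate_succ_apply' _ _ _

-- "index i is a repeat": some earlier state equals x i
def pvRep (p : Int) (a s : List Int) (i : Nat) : Prop :=
  ∃ j, j < i ∧ pvX p a s j = pvX p a s i

-- ---- rho-shape theory, parameterized by a minimal repeat (i0, mu) ----

theorem pvPer (p : Int) (a s : List Int) (i0 mu : Nat)
    (hmu_eq : pvX p a s mu = pvX p a s i0) (hmu_lt : mu < i0) :
    ∀ t, mu ≤ t → pvX p a s (t + (i0 - mu)) = pvX p a s t := by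
  intro t ht
  induction t, ht using Nat.le_induction with
  | base =>
    have : mu + (i0 - mu) = i0 := by omega
    rw [this, ← hmu_eq]
  | succ n hn ih =>
    have h1 : n + 1 + (i0 - mu) = (n + (i0 - mu)) + 1 := by omega
    rw [h1, pvX_succ, ih, ← pvX_succ]

theorem pvPerMul (p : Int) (a s : List Int) (i0 mu : Nat)
    (hmu_eq : pvX p a s mu = pvX p a s i0) (hmu_lt : mu < i0) :
    ∀ k t, mu ≤ t → pvX p a s (t + k * (i0 - mu)) = pvX p a s t := by
  intro k
  induction k with
  | zero => intro t _; simp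
  | succ n ih =>
    intro t ht
    have h1 : t + (n + 1) * (i0 - mu) = (t + n * (i0 - mu)) + (i0 - mu) := by ring
    rw [h1, pvPer p a s i0 mu hmu_eq hmu_lt _ (by omega), ih t ht]

-- reduction of any index ≥ mu into [mu, i0)
theorem pvRed (p : Int) (a s : List Int) (i0 mu : Nat)
    (hmu_eq : pvX p a s mu = pvX p a s i0) (hmu_lt : mu < i0) :
    ∀ t, mu ≤ t → pvX p a s t = pvX p a s (mu + (t - mu) % (i0 - mu)) := by
  intro t ht
  have hlam : 0 < i0 - mu := by omega
  have hdm := Nat.div_add_mod (t - mu) (i0 - mu)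
  have h2 := pvPerMul p a s i0 mu hmu_eq hmu_lt ((t - mu) / (i0 - mu))
      (mu + (t - mu) % (i0 - mu)) (by omega)
  have ht' : t = mu + (t - mu) % (i0 - mu) + (t - mu) / (i0 - mu) * (i0 - mu) := by
    rw [Nat.mul_comm ((t - mu) / (i0 - mu)) (i0 - mu)]; omega
  conv_lhs => rw [ht']
  exact h2

-- the central structure lemma: equal states imply tail bound and divisibility
theorem pvE (p : Int) (a s : List Int) (i0 mu : Nat)
    (hmu_eq : pvX p a s mu = pvX p a s i0) (hmu_lt : mu < i0)
    (hmin : ∀ i, i < i0 → ¬ pvRep p a s i) :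
    ∀ a' b', a' < b' → pvX p a s a' = pvX p a s b' →
      mu ≤ a' ∧ (i0 - mu) ∣ (b' - a') := by
  intro a' b' hab heq
  have hlam : 0 < i0 - mu := by omega
  -- reduce both indices into [0, i0)
  have key : ∀ c, pvX p a s c = pvX p a s (if c < i0 then c else mu + (c - mu) % (i0 - mu)) := by
    intro c
    by_cases hc : c < i0
    · simp [hc]
    · simp only [hc, if_false]
      exact pvRed p a s i0 mu hmu_eq hmu_lt c (by omega)
  have hred_lt : ∀ c, (if c < i0 then c else mu + (c - mu) % (i0 - mu)) < i0 := by
    intro c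
    by_cases hc : c < i0
    · simp [hc]
    · simp only [hc, if_false]
      have := Nat.mod_lt (c - mu) hlam
      omega
  -- reduced indices are equal, by injectivity below i0
  have hinj : ∀ u v, u < i0 → v < i0 → pvX p a s u = pvX p a s v → u = v := by
    intro u v hu hv huv
    rcases Nat.lt_trichotomy u v with h | h | h
    · exact absurd ⟨u, h, huv⟩ (hmin v hv)
    · exact h
    · exact absurd ⟨v, h, huv.symm⟩ (hmin u hu)
  have hre : (if a' < i0 then a' else mu + (a' - mu) % (i0 - mu)) =
      (if b' < i0 then b' else mu + (b' - mu) % (i0 - mu)) := by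
    apply hinj _ _ (hred_lt a') (hred_lt b')
    rw [← key a', ← key b']; exact heq
  by_cases hb : b' < i0
  · -- then a' < i0 too and equality of reduced forms gives a' = b', contradiction
    have ha : a' < i0 := lt_trans hab hb
    simp only [ha, hb, if_true] at hre
    omega
  · simp only [hb, if_false] at hre
    have hmodb := Nat.mod_lt (b' - mu) hlam
    by_cases ha : a' < i0
    · simp only [ha, if_true] at hre
      -- a' = mu + (b'-mu) % lam
      have hmu_le : mu ≤ a' := by omega
      refine ⟨hmu_le, ?_⟩
      have h1 : (a' - mu) % (i0 - mu) = (b' - mu) % (i0 - mu) := by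
        have hr : a' - mu = (b' - mu) % (i0 - mu) := by omega
        rw [hr]
        exact Nat.mod_eq_of_lt hmodb
      have h2 : (a' - mu) ≡ (b' - mu) [MOD (i0 - mu)] := h1
      have h3 := (Nat.modEq_iff_dvd' (by omega : a' - mu ≤ b' - mu)).mp h2
      have h4 : b' - mu - (a' - mu) = b' - a' := by omega
      rwa [h4] at h3
    · simp only [ha, if_false] at hre
      have hmu_le : mu ≤ a' := by omega
      refine ⟨hmu_le, ?_⟩
      have h1 : (a' - mu) % (i0 - mu) = (b' - mu) % (i0 - mu) := by omega
      have h2 : (a' - mu) ≡ (b' - mu) [MOD (i0 - mu)] := h1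
      have h3 := (Nat.modEq_iff_dvd' (by omega : a' - mu ≤ b' - mu)).mp h2
      have h4 : b' - mu - (a' - mu) = b' - a' := by omega
      rwa [h4] at h3

-- converse direction
theorem pvE' (p : Int) (a s : List Int) (i0 mu : Nat)
    (hmu_eq : pvX p a s mu = pvX p a s i0) (hmu_lt : mu < i0) :
    ∀ a' b', mu ≤ a' → a' ≤ b' → (i0 - mu) ∣ (b' - a') →
      pvX p a s a' = pvX p a s b' := by
  intro a' b' hmua hab hdvd
  obtain ⟨c, hc⟩ := hdvd
  have hb : b' = a' + c * (i0 - mu) := by rw [Nat.mul_comm c (i0 - mu)]; omega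
  rw [hb, pvPerMul p a s i0 mu hmu_eq hmu_lt c a' hmua]

-- ---- Floyd phase lemmas ----

theorem pvMeet_none (p : Int) (a s : List Int) :
    ∀ fuel i, pvMeet p a (pvX p a s i) (pvX p a s (2 * i)) fuel = none ↔
      ∀ d, d ≤ fuel → pvX p a s (i + d) ≠ pvX p a s (2 * (i + d)) := by
  intro fuel
  induction fuel with
  | zero =>
    intro i
    rw [pvMeet]
    by_cases heq : pvX p a s i = pvX p a s (2 * i)
    · rw [if_pos heq]
      constructor
      · intro h; cases h
      · intro h
        exact absurd heq (by simpa using h 0 (Nat.le_refl 0))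
    · rw [if_neg heq]
      constructor
      · intro _ d hd
        have hd0 : d = 0 := by omega
        subst hd0; simpa using heq
      · intro _; rfl
  | succ f ih =>
    intro i
    rw [pvMeet]
    by_cases heq : pvX p a s i = pvX p a s (2 * i)
    · rw [if_pos heq]
      constructor
      · intro h; cases h
      · intro h
        exact absurd heq (by simpa using h 0 (by omega))
    · rw [if_neg heq]
      have hrw1 : pvStep p a (pvX p a s i) = pvX p a s (i + 1) := (pvX_succ p a s i).symm
      have hrw2 : pvStep p a (pvStep p a (pvX p a s (2 * i))) = pvX p a s (2 * (i + 1)) := by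
        have e : 2 * (i + 1) = 2 * i + 1 + 1 := by omega
        rw [e, pvX_succ, pvX_succ]
      rw [hrw1, hrw2, ih (i + 1)]
      constructor
      · intro h d hd
        cases d with
        | zero => simpa using heq
        | succ d' =>
          have h2 := h d' (by omega)
          have e1 : i + (d' + 1) = i + 1 + d' := by omega
          rw [e1]
          exact h2
      · intro h d hd
        have h2 := h (d + 1) (by omega)
        have e1 : i + (d + 1) = i + 1 + d := by omega
        rw [e1] at h2
        exact h2

theorem pvMeet_some (p : Int) (a s : List Int) :
    ∀ fuel i v, pvMeet p a (pvX p a s i) (pvX p a s (2 * i)) fuel = some v →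
      ∃ M, i ≤ M ∧ M ≤ i + fuel ∧ pvX p a s M = pvX p a s (2 * M) ∧ v = pvX p a s M := by
  intro fuel
  induction fuel with
  | zero =>
    intro i v h
    rw [pvMeet] at h
    by_cases heq : pvX p a s i = pvX p a s (2 * i)
    · rw [if_pos heq] at h
      exact ⟨i, Nat.le_refl i, by omega, heq, by simpa using h.symm⟩
    · rw [if_neg heq] at h
      cases h
  | succ f ih =>
    intro i v h
    rw [pvMeet] at h
    by_cases heq : pvX p a s i = pvX p a s (2 * i)
    · rw [if_pos heq] at h
      exact ⟨i, Nat.le_refl i, by omega, heq, by simpa using h.symm⟩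
    · rw [if_neg heq] at h
      have hrw1 : pvStep p a (pvX p a s i) = pvX p a s (i + 1) := (pvX_succ p a s i).symm
      have hrw2 : pvStep p a (pvStep p a (pvX p a s (2 * i))) = pvX p a s (2 * (i + 1)) := by
        have e : 2 * (i + 1) = 2 * i + 1 + 1 := by omega
        rw [e, pvX_succ, pvX_succ]
      rw [hrw1, hrw2] at h
      obtain ⟨M, hM1, hM2, hM3, hM4⟩ := ih (i + 1) v h
      exact ⟨M, by omega, by omega, hM3, hM4⟩

theorem pvMu_spec (p : Int) (a s : List Int) (i0 mu M : Nat)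
    (hmu_eq : pvX p a s mu = pvX p a s i0) (hmu_lt : mu < i0)
    (hmin : ∀ i, i < i0 → ¬ pvRep p a s i)
    (hM1 : 1 ≤ M) (hMdvd : (i0 - mu) ∣ M) :
    ∀ fuel t, t ≤ mu → mu - t ≤ fuel →
      pvMu p a (pvX p a s t) (pvX p a s (t + M)) (t : Int) fuel = some (pvX p a s mu, (mu : Int)) := by
  intro fuel
  induction fuel with
  | zero =>
    intro t ht hf
    have htmu : t = mu := by omega
    subst htmu
    have hcond : pvX p a s t = pvX p a s (t + M) :=
      pvE' p a s i0 t hmu_eq hmu_lt t (t + M) (Nat.le_refl t) (by omega) (by simpa using hMdvd)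
    rw [pvMu, if_pos hcond]
  | succ f ih =>
    intro t ht hf
    by_cases htmu : t = mu
    · subst htmu
      have hcond : pvX p a s t = pvX p a s (t + M) :=
        pvE' p a s i0 t hmu_eq hmu_lt t (t + M) (Nat.le_refl t) (by omega) (by simpa using hMdvd)
      rw [pvMu, if_pos hcond]
    · have htlt : t < mu := by omega
      have hcond : pvX p a s t ≠ pvX p a s (t + M) := by
        intro hcontra
        have := (pvE p a s i0 mu hmu_eq hmu_lt hmin t (t + M) (by omega) hcontra).1
        omega
      rw [pvMu, if_neg hcond]
      have hrw1 : pvStep p a (pvX p a s t) = pvX p a s (t + 1) := (pvX_succ p a s t).symm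
      have hrw2 : pvStep p a (pvX p a s (t + M)) = pvX p a s (t + 1 + M) := by
        have e : t + 1 + M = (t + M) + 1 := by omega
        rw [e, pvX_succ]
      have hrw3 : (t : Int) + 1 = ((t + 1 : Nat) : Int) := by push_cast; ring
      rw [hrw1, hrw2, hrw3]
      exact ih (t + 1) (by omega) (by omega)

theorem pvLam_spec (p : Int) (a s : List Int) (i0 mu : Nat)
    (hmu_eq : pvX p a s mu = pvX p a s i0) (hmu_lt : mu < i0)
    (hmin : ∀ i, i < i0 → ¬ pvRep p a s i) :
    ∀ fuel l, 1 ≤ l → l ≤ i0 - mu → (i0 - mu) - l ≤ fuel →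
      pvLam p a (pvX p a s mu) (pvX p a s (mu + l)) (l : Int) fuel = some ((i0 - mu : Nat) : Int) := by
  intro fuel
  induction fuel with
  | zero =>
    intro l hl1 hl2 hf
    have hll : l = i0 - mu := by omega
    subst hll
    have hcond : pvX p a s (mu + (i0 - mu)) = pvX p a s mu :=
      (pvE' p a s i0 mu hmu_eq hmu_lt mu (mu + (i0 - mu)) (Nat.le_refl mu) (by omega) (by simp)).symm
    rw [pvLam, if_pos hcond]
  | succ f ih =>
    intro l hl1 hl2 hf
    by_cases hll : l = i0 - mu
    · subst hll
      have hcond : pvX p a s (mu + (i0 - mu)) = pvX p a s mu :=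
        (pvE' p a s i0 mu hmu_eq hmu_lt mu (mu + (i0 - mu)) (Nat.le_refl mu) (by omega) (by simp)).symm
      rw [pvLam, if_pos hcond]
    · have hllt : l < i0 - mu := by omega
      have hcond : pvX p a s (mu + l) ≠ pvX p a s mu := by
        intro hcontra
        have hdvd := (pvE p a s i0 mu hmu_eq hmu_lt hmin mu (mu + l) (by omega) hcontra.symm).2
        have : i0 - mu ≤ l := Nat.le_of_dvd (by omega) (by simpa using hdvd)
        omega
      rw [pvLam, if_neg hcond]
      have hrw1 : pvStep p a (pvX p a s (mu + l)) = pvX p a s (mu + (l + 1)) := by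
        have e : mu + (l + 1) = (mu + l) + 1 := by omega
        rw [e, pvX_succ]
      have hrw3 : (l : Int) + 1 = ((l + 1 : Nat) : Int) := by push_cast; ring
      rw [hrw1, hrw3]
      exact ih (l + 1) (by omega) (by omega) (by omega)

-- ---- A-loop lemmas ----

-- invariants: the dict maps exactly x 0 .. x k to their (first) indices
def pvH1 (p : Int) (a s : List Int) (k : Nat) (seen : PySem.Dict (List Int) Int) : Prop :=
  ∀ j, j ≤ k → seen.get? (pvX p a s j) = some (j : Int)
def pvH2 (p : Int) (a s : List Int) (k : Nat) (seen : PySem.Dict (List Int) Int) : Prop :=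
  ∀ y v, seen.get? y = some v → ∃ j, j ≤ k ∧ pvX p a s j = y

theorem pvLoopA_hits (p : Int) (a s : List Int) (i0 mu : Nat)
    (hmu_eq : pvX p a s mu = pvX p a s i0) (hmu_lt : mu < i0)
    (hmin : ∀ i, i < i0 → ¬ pvRep p a s i) :
    ∀ fuel k seen, k < i0 → i0 ≤ k + fuel + 1 →
      pvH1 p a s k seen → pvH2 p a s k seen →
      pvLoopA p a seen (pvX p a s k) (k : Int) fuel = some ((i0 : Int) - (mu : Int)) := by
  intro fuel
  induction fuel with
  | zero =>
    intro k seen hk hk2 hH1 hH2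
    have hk1 : k + 1 = i0 := by omega
    have hstep : pvStep p a (pvX p a s k) = pvX p a s (k + 1) := (pvX_succ p a s k).symm
    rw [pvLoopA.eq_def, hstep]
    have hxy : pvX p a s (k + 1) = pvX p a s mu := by
      rw [hk1]; exact hmu_eq.symm
    have hget : seen.get? (pvX p a s (k + 1)) = some (mu : Int) := by
      rw [hxy]; exact hH1 mu (by omega)
    simp only [hget]
    congr 1
    omega
  | succ f ih =>
    intro k seen hk hk2 hH1 hH2
    have hstep : pvStep p a (pvX p a s k) = pvX p a s (k + 1) := (pvX_succ p a s k).symm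
    rw [pvLoopA.eq_def, hstep]
    by_cases hk1 : k + 1 = i0
    · have hxy : pvX p a s (k + 1) = pvX p a s mu := by
        rw [hk1]; exact hmu_eq.symm
      have hget : seen.get? (pvX p a s (k + 1)) = some (mu : Int) := by
        rw [hxy]; exact hH1 mu (by omega)
      simp only [hget]
      congr 1
      omega
    · -- k + 1 < i0 : no repeat yet, so lookup misses and we recurse
      have hk1lt : k + 1 < i0 := by omega
      have hnodup : ∀ j, j ≤ k → pvX p a s j ≠ pvX p a s (k + 1) := by
        intro j hj hcontra
        exact hmin (k + 1) hk1lt ⟨j, by omega, hcontra⟩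
      have hget : seen.get? (pvX p a s (k + 1)) = none := by
        cases hoget : seen.get? (pvX p a s (k + 1)) with
        | none => rfl
        | some v =>
          obtain ⟨j, hj, hjx⟩ := hH2 _ _ hoget
          exact absurd hjx (hnodup j hj)
      simp only [hget]
      have hcast : (k : Int) + 1 = ((k + 1 : Nat) : Int) := by push_cast; ring
      rw [hcast]
      apply ih (k + 1) _ hk1lt (by omega)
      · intro j hj
        rcases Nat.lt_or_ge j (k + 1) with hj' | hj'
        · rw [PySem.Dict.get?_insert_of_ne _ _ (hnodup j (by omega))]
          exact hH1 j (by omega)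
        · have : j = k + 1 := by omega
          subst this
          rw [PySem.Dict.get?_insert_self]
      · intro y v hv
        rw [PySem.Dict.get?_insert] at hv
        by_cases hy : y = pvX p a s (k + 1)
        · exact ⟨k + 1, Nat.le_refl _, hy.symm⟩
        · rw [if_neg hy] at hv
          obtain ⟨j, hj, hjx⟩ := hH2 _ _ hv
          exact ⟨j, by omega, hjx⟩

theorem pvLoopA_misses (p : Int) (a s : List Int) :
    ∀ fuel k seen, (∀ i, k < i → i ≤ k + fuel + 1 → ¬ pvRep p a s i) →
      pvH1 p a s k seen → pvH2 p a s k seen →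
      pvLoopA p a seen (pvX p a s k) (k : Int) fuel = none := by
  intro fuel
  induction fuel with
  | zero =>
    intro k seen hnorep hH1 hH2
    have hstep : pvStep p a (pvX p a s k) = pvX p a s (k + 1) := (pvX_succ p a s k).symm
    rw [pvLoopA.eq_def, hstep]
    have hnodup : ∀ j, j ≤ k → pvX p a s j ≠ pvX p a s (k + 1) := by
      intro j hj hcontra
      exact hnorep (k + 1) (by omega) (by omega) ⟨j, by omega, hcontra⟩
    have hget : seen.get? (pvX p a s (k + 1)) = none := by
      cases hoget : seen.get? (pvX p a s (k + 1)) with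
      | none => rfl
      | some v =>
        obtain ⟨j, hj, hjx⟩ := hH2 _ _ hoget
        exact absurd hjx (hnodup j hj)
    simp only [hget]
  | succ f ih =>
    intro k seen hnorep hH1 hH2
    have hstep : pvStep p a (pvX p a s k) = pvX p a s (k + 1) := (pvX_succ p a s k).symm
    rw [pvLoopA.eq_def, hstep]
    have hnodup : ∀ j, j ≤ k → pvX p a s j ≠ pvX p a s (k + 1) := by
      intro j hj hcontra
      exact hnorep (k + 1) (by omega) (by omega) ⟨j, by omega, hcontra⟩
    have hget : seen.get? (pvX p a s (k + 1)) = none := by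
      cases hoget : seen.get? (pvX p a s (k + 1)) with
      | none => rfl
      | some v =>
        obtain ⟨j, hj, hjx⟩ := hH2 _ _ hoget
        exact absurd hjx (hnodup j hj)
    simp only [hget]
    have hcast : (k : Int) + 1 = ((k + 1 : Nat) : Int) := by push_cast; ring
    rw [hcast]
    apply ih (k + 1) _ (by intro i h1 h2; exact hnorep i (by omega) (by omega))
    · intro j hj
      rcases Nat.lt_or_ge j (k + 1) with hj' | hj'
      · rw [PySem.Dict.get?_insert_of_ne _ _ (hnodup j (by omega))]
        exact hH1 j (by omega)
      · have : j = k + 1 := by omega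
        subst this
        rw [PySem.Dict.get?_insert_self]
    · intro y v hv
      rw [PySem.Dict.get?_insert] at hv
      by_cases hy : y = pvX p a s (k + 1)
      · exact ⟨k + 1, Nat.le_refl _, hy.symm⟩
      · rw [if_neg hy] at hv
        obtain ⟨j, hj, hjx⟩ := hH2 _ _ hv
        exact ⟨j, by omega, hjx⟩

-- ===== VERDICT (by name: the statement is the Claim_ definition above) =====
theorem sequence_from_poly_spec : Claim_equal_sequence_from_poly := by
  intro p a s max_iter _hdom hpre
  obtain ⟨hp, hlen⟩ := hpre
  unfold Spec_sequence_from_poly sequence_from_poly sequence_from_poly_alt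
  rw [if_neg (not_not_intro hlen), if_neg (not_not_intro hlen)]
  have hN1 : (pvN max_iter - 1).toNat = max_iter.toNat := by unfold pvN; split_ifs <;> omega
  have hN2 : (pvN max_iter).toNat = max_iter.toNat + 1 := by unfold pvN; split_ifs <;> omega
  have hNval : pvN max_iter = ((max_iter.toNat + 1 : Nat) : Int) := by
    unfold pvN; split_ifs <;> omega
  rw [hN1, hN2]
  have hH1 : pvH1 p a s 0 (PySem.Dict.empty.insert s 0) := by
    intro j hj
    have hj0 : j = 0 := by omega
    subst hj0
    exact PySem.Dict.get?_insert_self _ _ _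
  have hH2 : pvH2 p a s 0 (PySem.Dict.empty.insert s 0) := by
    intro y v hv
    rw [PySem.Dict.get?_insert] at hv
    by_cases hy : y = s
    · exact ⟨0, Nat.le_refl 0, hy.symm⟩
    · rw [if_neg hy] at hv
      rw [PySem.Dict.get?_empty] at hv
      cases hv
  have e2 : pvStep p a (pvStep p a s) = pvX p a s (2 * 1) := by
    have h2 : (2 * 1 : Nat) = 0 + 1 + 1 := by omega
    rw [h2, pvX_succ, pvX_succ, pvX_zero]
  have e1 : pvStep p a s = pvX p a s 1 := by
    have h1 : (1 : Nat) = 0 + 1 := by omega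
    rw [h1, pvX_succ, pvX_zero]
  rw [e2, e1]
  by_cases hex : ∃ i, pvRep p a s i
  · -- a repeat exists somewhere; let (i0, mu) be the minimal one
    haveI : DecidablePred (pvRep p a s) := fun i => by unfold pvRep; infer_instance
    obtain ⟨j0, hj0lt, hj0eq⟩ := Nat.find_spec hex
    have hmin : ∀ i, i < Nat.find hex → ¬ pvRep p a s i := fun i hi => Nat.find_min hex hi
    have hmuex : ∃ j, pvX p a s j = pvX p a s (Nat.find hex) := ⟨j0, hj0eq⟩
    have hmu_eq : pvX p a s (Nat.find hmuex) = pvX p a s (Nat.find hex) := Nat.find_spec hmuex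
    have hmu_lt : Nat.find hmuex < Nat.find hex :=
      lt_of_le_of_lt (Nat.find_min' hmuex hj0eq) hj0lt
    generalize hi0_def : Nat.find hex = i0 at *
    generalize hmu_def : Nat.find hmuex = mu at *
    -- the guaranteed meeting point: smallest positive multiple of lam that is > mu
    have hdm := Nat.div_add_mod mu (i0 - mu)
    have hmod : mu % (i0 - mu) < i0 - mu := Nat.mod_lt _ (by omega)
    have he : (i0 - mu) * (mu / (i0 - mu) + 1) = (i0 - mu) * (mu / (i0 - mu)) + (i0 - mu) := by
      ring
    have h1' : (i0 - mu) * (mu / (i0 - mu)) ≤ mu := by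
      rw [Nat.mul_comm]; exact Nat.div_mul_le_self mu (i0 - mu)
    have hM0mu : mu < (i0 - mu) * (mu / (i0 - mu) + 1) := by omega
    have hM0le : (i0 - mu) * (mu / (i0 - mu) + 1) ≤ i0 := by omega
    have hM0dvd : (i0 - mu) ∣ (i0 - mu) * (mu / (i0 - mu) + 1) :=
      dvd_mul_right _ _
    have hM0eq : pvX p a s ((i0 - mu) * (mu / (i0 - mu) + 1)) =
        pvX p a s (2 * ((i0 - mu) * (mu / (i0 - mu) + 1))) := by
      apply pvE' p a s i0 mu hmu_eq hmu_lt _ _ (by omega) (by omega)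
      rw [show 2 * ((i0 - mu) * (mu / (i0 - mu) + 1)) - (i0 - mu) * (mu / (i0 - mu) + 1)
            = (i0 - mu) * (mu / (i0 - mu) + 1) by omega]
      exact hM0dvd
    by_cases hle : i0 ≤ max_iter.toNat + 1
    · -- the repeat is within A's budget: both sides return lam = i0 - mu
      have hA : pvLoopA p a (PySem.Dict.empty.insert s 0) s 0 max_iter.toNat
          = some ((i0 : Int) - (mu : Int)) :=
        pvLoopA_hits p a s i0 mu hmu_eq hmu_lt hmin max_iter.toNat 0 _ (by omega) (by omega) hH1 hH2
      rw [hA]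
      cases hmeet : pvMeet p a (pvX p a s 1) (pvX p a s (2 * 1)) max_iter.toNat with
      | none =>
        exfalso
        have hall := (pvMeet_none p a s max_iter.toNat 1).mp hmeet
        have hd := hall ((i0 - mu) * (mu / (i0 - mu) + 1) - 1) (by omega)
        rw [show 1 + ((i0 - mu) * (mu / (i0 - mu) + 1) - 1)
              = (i0 - mu) * (mu / (i0 - mu) + 1) by omega] at hd
        exact hd hM0eq
      | some v =>
        obtain ⟨M, hM1, hM2, hM3, hv⟩ := pvMeet_some p a s max_iter.toNat 1 v hmeet
        have hEM := pvE p a s i0 mu hmu_eq hmu_lt hmin M (2 * M) (by omega) hM3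
        have hmuM : mu ≤ M := hEM.1
        have hdvdM : (i0 - mu) ∣ M := by
          have h2 := hEM.2
          rwa [show 2 * M - M = M by omega] at h2
        have hlamM : i0 - mu ≤ M := Nat.le_of_dvd (by omega) hdvdM
        have hmu_run := pvMu_spec p a s i0 mu M hmu_eq hmu_lt hmin (by omega) hdvdM
          (max_iter.toNat + 1) 0 (by omega) (by omega)
        rw [Nat.zero_add] at hmu_run
        rw [hv]
        dsimp only
        rw [show pvMu p a s (pvX p a s M) 0 (max_iter.toNat + 1)
              = some (pvX p a s mu, (mu : Int)) from hmu_run]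
        dsimp only
        have hlam_run := pvLam_spec p a s i0 mu hmu_eq hmu_lt hmin
          (max_iter.toNat + 1) 1 (Nat.le_refl 1) (by omega) (by omega)
        rw [show pvStep p a (pvX p a s mu) = pvX p a s (mu + 1) from (pvX_succ p a s mu).symm]
        rw [show pvLam p a (pvX p a s mu) (pvX p a s (mu + 1)) 1 (max_iter.toNat + 1)
              = some ((i0 - mu : Nat) : Int) from hlam_run]
        dsimp only
        rw [if_pos (by rw [hNval]; omega : (mu : Int) + ((i0 - mu : Nat) : Int) ≤ pvN max_iter)]
        have : (i0 : Int) - (mu : Int) = ((i0 - mu : Nat) : Int) := by omega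
        rw [this]
    · -- the repeat is beyond A's budget: both sides return none
      have hA : pvLoopA p a (PySem.Dict.empty.insert s 0) s 0 max_iter.toNat = none :=
        pvLoopA_misses p a s max_iter.toNat 0 _ (fun i _ h2 => hmin i (by omega)) hH1 hH2
      rw [hA]
      cases hmeet : pvMeet p a (pvX p a s 1) (pvX p a s (2 * 1)) max_iter.toNat with
      | none => rfl
      | some v =>
        obtain ⟨M, hM1, hM2, hM3, hv⟩ := pvMeet_some p a s max_iter.toNat 1 v hmeet
        have hEM := pvE p a s i0 mu hmu_eq hmu_lt hmin M (2 * M) (by omega) hM3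
        have hmuM : mu ≤ M := hEM.1
        have hdvdM : (i0 - mu) ∣ M := by
          have h2 := hEM.2
          rwa [show 2 * M - M = M by omega] at h2
        have hlamM : i0 - mu ≤ M := Nat.le_of_dvd (by omega) hdvdM
        have hmu_run := pvMu_spec p a s i0 mu M hmu_eq hmu_lt hmin (by omega) hdvdM
          (max_iter.toNat + 1) 0 (by omega) (by omega)
        rw [Nat.zero_add] at hmu_run
        rw [hv]
        dsimp only
        rw [show pvMu p a s (pvX p a s M) 0 (max_iter.toNat + 1)
              = some (pvX p a s mu, (mu : Int)) from hmu_run]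
        dsimp only
        have hlam_run := pvLam_spec p a s i0 mu hmu_eq hmu_lt hmin
          (max_iter.toNat + 1) 1 (Nat.le_refl 1) (by omega) (by omega)
        rw [show pvStep p a (pvX p a s mu) = pvX p a s (mu + 1) from (pvX_succ p a s mu).symm]
        rw [show pvLam p a (pvX p a s mu) (pvX p a s (mu + 1)) 1 (max_iter.toNat + 1)
              = some ((i0 - mu : Nat) : Int) from hlam_run]
        dsimp only
        rw [if_neg (by rw [hNval]; omega : ¬ ((mu : Int) + ((i0 - mu : Nat) : Int) ≤ pvN max_iter))]
  · -- no repeat at all: A runs out of budget, Floyd never meets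
    have hA : pvLoopA p a (PySem.Dict.empty.insert s 0) s 0 max_iter.toNat = none :=
      pvLoopA_misses p a s max_iter.toNat 0 _ (fun i _ _ h => hex ⟨i, h⟩) hH1 hH2
    rw [hA]
    cases hmeet : pvMeet p a (pvX p a s 1) (pvX p a s (2 * 1)) max_iter.toNat with
    | none => rfl
    | some v =>
      exfalso
      obtain ⟨M, hM1, hM2, hM3, _⟩ := pvMeet_some p a s max_iter.toNat 1 v hmeet
      exact hex ⟨2 * M, M, by omega, hM3⟩
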